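-- pv_equiv track=rewrite | github.com/ConstantinRuhdorfer/pyprove | pyprove/log.py | humanint
-- ===== SOURCE A (Python) =====
-- def humanint(n):
--    s = str(int(abs(n)))
--    r = s[-3:]
--    s = s[:-3]
--    while s:
--       r = s[-3:] + "," + r
--       s = s[:-3]
--    return r if n >= 0 else "-%s" % r
-- ===== SOURCE B (Python) =====
-- def humanint(n):
--    m = format(int(abs(n)), ",")
--    return m if n >= 0 else "-" + m
-- ===== Notes on version B (the rewrite author's own statement) =====
-- stated objective: idiomatic
-- what changed: Replaces the manual while-loop that repeatedly slices off the last three digits with Python's built-in closed-form thousands formatter format(int(abs(n)), ','), then reattaches the sign from the original value.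
import Mathlib
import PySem

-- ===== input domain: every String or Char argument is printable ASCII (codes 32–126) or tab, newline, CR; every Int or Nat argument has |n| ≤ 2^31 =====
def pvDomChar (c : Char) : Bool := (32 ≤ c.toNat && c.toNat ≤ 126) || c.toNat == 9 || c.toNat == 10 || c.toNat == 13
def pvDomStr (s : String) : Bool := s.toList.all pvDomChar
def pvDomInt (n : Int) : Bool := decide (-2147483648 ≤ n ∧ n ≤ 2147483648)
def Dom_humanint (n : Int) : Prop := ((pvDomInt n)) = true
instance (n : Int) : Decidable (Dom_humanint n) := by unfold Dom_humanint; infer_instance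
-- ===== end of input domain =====

-- B replaces A's while-loop of repeated three-character slices with the closed-form
-- thousands formatter (format(int(abs(n)), ',')), reattaching the sign from n (idiomatic).

-- ===== PORT A =====
-- the while loop: r, s evolve; s[-3:] / s[:-3] ported with PySem.List.slice (exact)
def pvLoopA (s r : List Char) : List Char :=
  if h : s = [] then r
  else pvLoopA (PySem.List.slice s none (some (-3)))
               (PySem.List.slice s (some (-3)) none ++ ',' :: r)
termination_by s.length
decreasing_by
  rw [PySem.List.slice_to_neg_ofNat s 3 (by omega)]
  have : s.length ≠ 0 := by simpa [List.length_eq_zero_iff] using h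
  simp [List.length_take]; omega

def humanint (n : Int) : String :=
  let s := (PySem.Int.toStr |n|).toList      -- str(int(abs(n))): for an Int argument, int(abs(n)) = |n|
  let r := PySem.List.slice s (some (-3)) none
  let s1 := PySem.List.slice s none (some (-3))
  let r1 := pvLoopA s1 r
  if n ≥ 0 then String.ofList r1 else String.ofList ('-' :: r1)

-- ===== PORT B =====
-- hand port (exact) of format(m, ','): group the digit characters in threes from the
-- right, i.e. chunk the reversed digit list in threes, joining with ','
def pvGroupRev (rev : List Char) : List Char :=
  if rev.length ≤ 3 then rev
  else rev.take 3 ++ ',' :: pvGroupRev (rev.drop 3)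
termination_by rev.length
decreasing_by simp [List.length_drop]; omega

def humanint_alt (n : Int) : String :=
  let m := (pvGroupRev ((PySem.Int.toStr |n|).toList).reverse).reverse
  if n ≥ 0 then String.ofList m else String.ofList ('-' :: m)

-- ===== PRECONDITION & SPEC =====
def Spec_humanint (n : Int) (out : String) : Prop := out = humanint_alt n
instance (n : Int) (out : String) : Decidable (Spec_humanint n out) := by unfold Spec_humanint; infer_instance

-- ===== CLAIM (what is proved, stated in full; the proofs are below) =====
def Claim_equal_humanint : Prop := ∀ (n : Int), Dom_humanint n → Spec_humanint n (humanint n)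

-- ===== LEMMAS AND PROOFS =====

-- one grouping step of B, read from the left end of the digit string
theorem pvGroupRev_step (s : List Char) (h : 3 < s.length) :
    (pvGroupRev s.reverse).reverse
      = (pvGroupRev (s.take (s.length - 3)).reverse).reverse ++ ',' :: s.drop (s.length - 3) := by
  rw [pvGroupRev]
  simp only [List.length_reverse]
  rw [if_neg (by omega)]
  rw [List.take_reverse, List.drop_reverse]
  simp

-- A's loop, run on s[:-3] with accumulator s[-3:], produces exactly B's grouping of s
theorem pvLoopA_eq (s acc : List Char) :
    pvLoopA s acc = if s = [] then acc else (pvGroupRev s.reverse).reverse ++ ',' :: acc := by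
  induction hn : s.length using Nat.strong_induction_on generalizing s acc with
  | _ n ih =>
    rw [pvLoopA]
    by_cases hs : s = []
    · simp [hs]
    · rw [dif_neg hs, if_neg hs]
      rw [PySem.List.slice_to_neg_ofNat s 3 (by omega),
          PySem.List.slice_from_neg_ofNat s 3 (by omega)]
      have hlen : s.length ≠ 0 := by simpa [List.length_eq_zero_iff] using hs
      by_cases h3 : s.length ≤ 3
      · have h0 : s.length - 3 = 0 := by omega
        rw [h0]
        simp only [List.take_zero, List.drop_zero]
        have hc : s.reverse.length ≤ 3 := by simpa using h3
        rw [pvLoopA, dif_pos rfl, pvGroupRev, if_pos hc]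
        simp
      · rw [not_le] at h3
        have htk : (s.take (s.length - 3)).length = s.length - 3 := by
          simp [List.length_take]
        rw [ih (s.length - 3) (by omega) _ _ htk]
        rw [if_neg (by simp [List.eq_nil_iff_length_eq_zero, htk]; omega)]
        rw [pvGroupRev_step s h3]
        simp

theorem core_eq (s : List Char) :
    pvLoopA (PySem.List.slice s none (some (-3))) (PySem.List.slice s (some (-3)) none)
      = (pvGroupRev s.reverse).reverse := by
  rw [PySem.List.slice_to_neg_ofNat s 3 (by omega),
      PySem.List.slice_from_neg_ofNat s 3 (by omega)]
  rw [pvLoopA_eq]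
  by_cases h3 : s.length ≤ 3
  · have h0 : s.length - 3 = 0 := by omega
    have hc : s.reverse.length ≤ 3 := by simpa using h3
    conv_rhs => rw [pvGroupRev, if_pos hc]
    simp [h0]
  · rw [not_le] at h3
    rw [if_neg (by simp [List.eq_nil_iff_length_eq_zero, List.length_take]; omega)]
    rw [pvGroupRev_step s h3]

-- ===== VERDICT (by name: the statement is the Claim_ definition above) =====
theorem humanint_spec : Claim_equal_humanint := by
  intro n _
  unfold Spec_humanint
  simp only [humanint, humanint_alt]
  rw [core_eq]
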